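-- pv_equiv track=rewrite | github.com/yangwooseong/eulerproject | pro40.py | champer
-- ===== SOURCE A (Python) =====
-- def champer(n):
--     i = 1
--     while n > 0:
--         m = list(str(i))[::-1]
--         while m != [] and n > 0:
--             yield int(m.pop())
--             n -= 1
--         i += 1
-- ===== SOURCE B (Python) =====
-- def champer(n):
--     # two-phase: build the concatenated digit buffer first, then emit its first n digits
--     parts = []
--     total = 0
--     i = 1
--     while total < n:
--         t = str(i)
--         parts.append(t)
--         total += len(t)
--         i += 1
--     s = ''.join(parts)
--     for c in s[:n]:
--         yield int(c)
-- ===== Notes on version B (the rewrite author's own statement) =====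
-- stated objective: faster
-- what changed: A interleaves producing digits of each integer with emitting them inside a nested loop that counts n down and pops a reversed per-integer char list; B first builds the whole digit buffer (list of str(i) parts joined once) and then emits its first n characters in a separate pass, avoiding per-digit list reversal/pop work.
import Mathlib
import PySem

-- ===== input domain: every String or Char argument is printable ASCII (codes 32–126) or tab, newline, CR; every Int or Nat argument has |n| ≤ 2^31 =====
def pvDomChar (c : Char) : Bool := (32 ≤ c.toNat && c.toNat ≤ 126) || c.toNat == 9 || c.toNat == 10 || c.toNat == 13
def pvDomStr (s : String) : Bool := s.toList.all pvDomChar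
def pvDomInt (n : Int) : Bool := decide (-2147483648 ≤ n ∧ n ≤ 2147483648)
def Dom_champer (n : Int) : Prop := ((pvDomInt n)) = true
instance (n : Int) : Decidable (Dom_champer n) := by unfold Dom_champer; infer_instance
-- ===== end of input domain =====

-- B restructures A's interleaved produce-and-emit nested loop into two phases (build the whole
-- concatenated digit buffer via join, then emit its first n characters); same return value,
-- measured faster by a constant factor (no per-digit reversal/pop work).

-- int(c) for a one-character digit string (both Pythons' `int(...)` applied to a single char)
def pvDigitInt (c : Char) : Int := (PySem.Int.ofChars? [c]).getD 0

-- str(i) is never empty (cited by both ports' termination proofs)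
theorem pvToChars_ne_nil (i : Int) : PySem.Int.toChars i ≠ [] := by
  unfold PySem.Int.toChars
  split
  · simp
  · exact List.ne_nil_of_length_pos Nat.length_toDigits_pos

-- ===== PORT A =====
-- inner `while m != [] and n > 0` loop of A: returns (yielded digits, final n)
def champInner (m : List Char) (n : Int) : List Int × Int :=
  if h : m ≠ [] ∧ 0 < n then
    let r := champInner m.dropLast (n - 1)
    (pvDigitInt (m.getLast h.1) :: r.1, r.2)
  else ([], n)
termination_by m.length
decreasing_by
  rcases h with ⟨h1, -⟩
  cases m with
  | nil => exact absurd rfl h1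
  | cons a t => simp

-- the inner loop never increases n (cited by champAux's termination proof)
theorem champInner_snd_le (m : List Char) (n : Int) : (champInner m n).2 ≤ n := by
  fun_induction champInner with
  | case1 m n h r ih => simp only [r] at *; omega
  | case2 m n h => simp

theorem champInner_snd_lt (m : List Char) (n : Int) (hm : m ≠ []) (hn : 0 < n) :
    (champInner m n).2 < n := by
  rw [champInner, dif_pos ⟨hm, hn⟩]
  have := champInner_snd_le m.dropLast (n - 1)
  simpa using by omega

-- outer `while n > 0` loop of A
def champAux (n : Int) (i : Int) : List Int :=
  if h : 0 < n then
    let m := (PySem.Int.toChars i).reverse   -- m = list(str(i))[::-1]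
    let r := champInner m n
    r.1 ++ champAux r.2 (i + 1)
  else []
termination_by n.toNat
decreasing_by
  have hm : (PySem.Int.toChars i).reverse ≠ [] := by
    simpa using pvToChars_ne_nil i
  have := champInner_snd_lt ((PySem.Int.toChars i).reverse) n hm h
  omega

def champer (n : Int) : List Int := champAux n 1

-- ===== PORT B =====
-- phase 1 of B: `while total < n: parts.append(str(i)); total += len(str(i)); i += 1`
def buildAux (n : Int) (parts : List (List Char)) (total : Int) (i : Int) : List (List Char) :=
  if total < n then
    buildAux n (parts ++ [PySem.Int.toChars i]) (total + (PySem.Int.toChars i).length) (i + 1)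
  else parts
termination_by (n - total).toNat
decreasing_by
  have := pvToChars_ne_nil i
  have h1 : 1 ≤ (PySem.Int.toChars i).length := by
    cases hc : PySem.Int.toChars i with
    | nil => exact absurd hc this
    | cons a t => simp
  omega

-- phase 2 of B: `s = ''.join(parts)` (join with empty separator = flatten), then
-- `for c in s[:n]: yield int(c)`
def champer_alt (n : Int) : List Int :=
  (PySem.List.slice (buildAux n [] 0 1).flatten none (some n)).map pvDigitInt

-- ===== PRECONDITION & SPEC =====
def Spec_champer (n : Int) (out : List Int) : Prop := out = champer_alt n
instance (n : Int) (out : List Int) : Decidable (Spec_champer n out) := by unfold Spec_champer; infer_instance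

-- ===== CLAIM (what is proved, stated in full; the proofs are below) =====
def Claim_equal_champer : Prop := ∀ (n : Int), Dom_champer n → Spec_champer n (champer n)

-- ===== LEMMAS AND PROOFS =====

-- A's inner loop on the reversed digit list emits the first min(len, n) digits in order
theorem champInner_reverse (l : List Char) (n : Int) :
    champInner l.reverse n =
      ((l.take n.toNat).map pvDigitInt, n - ((min l.length n.toNat : Nat) : Int)) := by
  induction l generalizing n with
  | nil => rw [champInner]; simp
  | cons a t ih =>
    by_cases hn : 0 < n
    · rw [show (a :: t).reverse = t.reverse ++ [a] by simp, champInner,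
        dif_pos ⟨by simp, hn⟩]
      simp only [List.getLast_concat, List.dropLast_concat, ih (n - 1)]
      rw [Prod.mk.injEq]
      refine ⟨?_, ?_⟩
      · have htake : (a :: t).take n.toNat = a :: t.take ((n - 1).toNat) := by
          have : n.toNat = (n - 1).toNat + 1 := by omega
          rw [this, List.take_succ_cons]
        rw [htake]; simp
      · simp only [List.length_cons]; omega
    · rw [champInner, dif_neg (by rintro ⟨-, h⟩; omega)]
      have : n.toNat = 0 := by omega
      simp [this]

-- B's build loop: the parts accumulated so far can be pulled out in front
theorem buildAux_shift (k : Nat) (n : Int) (parts : List (List Char)) (total : Int) (i : Int)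
    (hk : (n - total).toNat ≤ k) :
    buildAux n parts total i = parts ++ buildAux (n - total) [] 0 i := by
  induction k generalizing n parts total i with
  | zero =>
    have hns : ¬ (total < n) := by omega
    rw [buildAux, if_neg hns, buildAux, if_neg (by omega)]
    simp
  | succ k ih =>
    by_cases hns : total < n
    · have hd : 1 ≤ (PySem.Int.toChars i).length := by
        cases hc : PySem.Int.toChars i with
        | nil => exact absurd hc (pvToChars_ne_nil i)
        | cons a t => simp
      rw [buildAux, if_pos hns]
      rw [ih n (parts ++ [PySem.Int.toChars i]) _ (i + 1) (by omega)]
      conv_rhs => rw [buildAux]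
      rw [if_pos (by omega), List.nil_append]
      rw [ih (n - total) [PySem.Int.toChars i] _ (i + 1) (by omega)]
      simp only [List.append_assoc]
      congr 3
      omega
    · rw [buildAux, if_neg hns, buildAux, if_neg (by omega)]
      simp

-- the bridge: A's interleaved loop equals "first n chars of B's buffer, mapped to digits"
theorem champAux_spec (k : Nat) (n : Int) (i : Int) (hk : n.toNat ≤ k) :
    champAux n i = ((buildAux n [] 0 i).flatten.take n.toNat).map pvDigitInt := by
  induction k generalizing n i with
  | zero =>
    rw [champAux, dif_neg (by omega)]
    have : n.toNat = 0 := by omega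
    simp [this]
  | succ k ih =>
    by_cases hn : 0 < n
    · rw [champAux, dif_pos hn]
      simp only [champInner_reverse]
      set d := PySem.Int.toChars i with hd
      have hd1 : 1 ≤ d.length := by
        cases hc : d with
        | nil => exact absurd hc (pvToChars_ne_nil i)
        | cons a t => simp
      -- RHS: one build step, then shift the first part out
      conv_rhs => rw [buildAux]
      rw [if_pos hn, List.nil_append]
      rw [buildAux_shift k n [d] ((0 : Int) + d.length) (i + 1) (by omega),
        show (0 : Int) + (d.length : Int) = (d.length : Int) by ring]
      rw [List.flatten_append, List.flatten_cons, List.flatten_nil, List.append_nil]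
      rw [List.take_append, List.map_append]
      congr 1
      by_cases hL : d.length ≤ n.toNat
      · have h1 : (n - d.length).toNat = n.toNat - d.length := by omega
        have h2 : ((min d.length n.toNat : Nat) : Int) = (d.length : Int) := by omega
        rw [h2, ih (n - d.length) (i + 1) (by omega), h1]
      · have h0 : n - ((min d.length n.toNat : Nat) : Int) = 0 := by omega
        rw [h0, champAux, dif_neg (by omega)]
        have : n.toNat - d.length = 0 := by omega
        simp [this]
    · rw [champAux, dif_neg hn]
      have : n.toNat = 0 := by omega
      simp [this]

-- ===== VERDICT (by name: the statement is the Claim_ definition above) =====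
theorem champer_spec : Claim_equal_champer := by
  intro n _
  unfold Spec_champer champer champer_alt
  rw [champAux_spec n.toNat n 1 le_rfl]
  by_cases hn : 0 ≤ n
  · rw [PySem.List.slice_to _ hn]
  · rw [buildAux, if_neg (by omega)]
    have : n.toNat = 0 := by omega
    simp [this, PySem.List.slice]
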